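-- pv_equiv track=rewrite | github.com/armagheaddon/Uno | bot_taki.py | count_playable_cards
-- ===== SOURCE A (Python) =====
-- def count_playable_cards (hand,pile,pile_color):
--     """
--     This function only takes the hand list the pile and the piles color
--     It returns the amount of playable cards we have sorted by their type
--     and a list of all the playable cards
--     """
--     how_many_TAKI = 0
--     #how many playable + cards do we have
--     how_many_plus = 0
--     #how many playable change direction cards do we have
--     how_many_CHADIR = 0
--     #how many playable stop or +2 cards do we have
--     how_many_STOP_or_plus_two = 0
--     #how many change color cards do we have
--     how_many_CHCOL = 0
--     #how many regular cards (1-9) do we have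
--     how_many_regular_num = 0
--     #a list of all the cards we can play
--     cards_that_can_play = []
--
--     for card in hand:
--         if card["color"] == pile_color or card["value"] == pile["value"] or card["color"] == "ALL":
--             if card["value"] == "TAKI":
--                 how_many_TAKI += 1
--             else:
--                 if card["value"] == "+":
--                     how_many_plus += 1
--                 else:
--                     if card["value"] == "CHADIR":
--                         how_many_CHADIR += 1
--                     else:
--                         if card["value"] == "STOP" or card["value"] == "+2":
--                             how_many_STOP_or_plus_two += 1
--                         else:
--                             if card["value"] == "chcol":
--                                 how_many_CHCOL += 1
--                             else:
--                                 how_many_regular_num += 1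
--             cards_that_can_play.append(card)
--     return cards_that_can_play,how_many_TAKI, how_many_plus, how_many_CHADIR, how_many_STOP_or_plus_two, how_many_CHCOL, how_many_regular_num
-- ===== SOURCE B (Python) =====
-- def count_playable_cards(hand, pile, pile_color):
--     playable = [c for c in hand
--                 if c["color"] == pile_color or c["value"] == pile["value"]
--                 or c["color"] == "ALL"]
--     values = [c["value"] for c in playable]
--     taki = values.count("TAKI")
--     plus = values.count("+")
--     chadir = values.count("CHADIR")
--     stop = values.count("STOP") + values.count("+2")
--     chcol = values.count("chcol")
--     regular = len(values) - taki - plus - chadir - stop - chcol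
--     return playable, taki, plus, chadir, stop, chcol, regular
-- ===== Notes on version B (the rewrite author's own statement) =====
-- stated objective: alternative
-- what changed: Drops A's per-card classification branch entirely: B filters the playable cards, projects their values, obtains each special count by an independent list.count scan for that literal value, and derives the regular-number count arithmetically as len(values) minus the special counts.
import Mathlib
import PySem

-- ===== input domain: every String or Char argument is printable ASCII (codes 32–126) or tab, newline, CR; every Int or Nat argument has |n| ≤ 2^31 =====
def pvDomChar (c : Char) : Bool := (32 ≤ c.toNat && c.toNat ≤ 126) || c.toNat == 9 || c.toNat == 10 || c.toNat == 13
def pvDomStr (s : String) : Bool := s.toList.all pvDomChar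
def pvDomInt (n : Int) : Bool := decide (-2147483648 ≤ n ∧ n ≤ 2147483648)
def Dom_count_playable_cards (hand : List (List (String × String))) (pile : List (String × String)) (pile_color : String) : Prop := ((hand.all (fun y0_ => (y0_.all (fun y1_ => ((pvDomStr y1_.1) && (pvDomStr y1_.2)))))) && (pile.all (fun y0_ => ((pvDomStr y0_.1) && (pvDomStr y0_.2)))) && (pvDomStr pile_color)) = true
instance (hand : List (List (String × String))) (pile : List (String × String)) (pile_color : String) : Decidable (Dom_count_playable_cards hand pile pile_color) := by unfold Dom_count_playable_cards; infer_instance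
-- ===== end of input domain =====

-- B drops A's per-card classification branch: it filters the playable cards, projects their
-- values, takes each special count by an independent list-count scan, and derives the regular
-- count by subtraction from the length (objective: alternative decomposition, same cost).

-- shared primitive: Python's card["k"] dict indexing (none = KeyError)
def pvGet (d : List (String × String)) (k : String) : Option String :=
  (PySem.Dict.ofList d).get? k

-- ===== PORT A =====
def count_playable_cards (hand : List (List (String × String))) (pile : List (String × String)) (pile_color : String) : (List (List (String × String))) × Int × Int × Int × Int × Int × Int :=
  hand.foldl (fun (st : (List (List (String × String))) × Int × Int × Int × Int × Int × Int) card =>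
    let (cards, t, pl, ch, sp, cc, rn) := st
    if (pvGet card "color" == some pile_color) || (pvGet card "value" == pvGet pile "value") || (pvGet card "color" == some "ALL") then
      if pvGet card "value" == some "TAKI" then (cards ++ [card], t + 1, pl, ch, sp, cc, rn)
      else if pvGet card "value" == some "+" then (cards ++ [card], t, pl + 1, ch, sp, cc, rn)
      else if pvGet card "value" == some "CHADIR" then (cards ++ [card], t, pl, ch + 1, sp, cc, rn)
      else if (pvGet card "value" == some "STOP") || (pvGet card "value" == some "+2") then (cards ++ [card], t, pl, ch, sp + 1, cc, rn)
      else if pvGet card "value" == some "chcol" then (cards ++ [card], t, pl, ch, sp, cc + 1, rn)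
      else (cards ++ [card], t, pl, ch, sp, cc, rn + 1)
    else st) ([], 0, 0, 0, 0, 0, 0)

-- ===== PORT B =====
def count_playable_cards_alt (hand : List (List (String × String))) (pile : List (String × String)) (pile_color : String) : (List (List (String × String))) × Int × Int × Int × Int × Int × Int :=
  let playable := hand.filter (fun c =>
    (pvGet c "color" == some pile_color) || (pvGet c "value" == pvGet pile "value") || (pvGet c "color" == some "ALL"))
  let values := playable.map (fun c => pvGet c "value")
  let taki : Int := PySem.List.count values (some "TAKI")
  let plus : Int := PySem.List.count values (some "+")
  let chadir : Int := PySem.List.count values (some "CHADIR")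
  let stop : Int := PySem.List.count values (some "STOP") + PySem.List.count values (some "+2")
  let chcol : Int := PySem.List.count values (some "chcol")
  let regular : Int := (values.length : Int) - taki - plus - chadir - stop - chcol
  (playable, taki, plus, chadir, stop, chcol, regular)

-- ===== PRECONDITION & SPEC =====
-- Pre_ excludes exactly the inputs on which A raises KeyError: some reached card lacks a
-- "color" or "value" key, or pile lacks "value" while some card's color differs from pile_color.
def Pre_count_playable_cards (hand : List (List (String × String))) (pile : List (String × String)) (pile_color : String) : Prop :=
  (∀ c ∈ hand, (PySem.Dict.ofList c).contains "color" = true ∧ (PySem.Dict.ofList c).contains "value" = true) ∧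
  ((PySem.Dict.ofList pile).contains "value" = true ∨ ∀ c ∈ hand, (PySem.Dict.ofList c).get? "color" = some pile_color)
instance (hand : List (List (String × String))) (pile : List (String × String)) (pile_color : String) : Decidable (Pre_count_playable_cards hand pile pile_color) := by unfold Pre_count_playable_cards; infer_instance

def pvWitness_count_playable_cards : (List (List (String × String))) × (List (String × String)) × String :=
  ([[("color", "RED"), ("value", "3")], [("color", "BLUE"), ("value", "TAKI")]], [("color", "RED"), ("value", "3")], "RED")

def Spec_count_playable_cards (hand : List (List (String × String))) (pile : List (String × String)) (pile_color : String) (out : (List (List (String × String))) × Int × Int × Int × Int × Int × Int) : Prop := out = count_playable_cards_alt hand pile pile_color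
instance (hand : List (List (String × String))) (pile : List (String × String)) (pile_color : String) (out : (List (List (String × String))) × Int × Int × Int × Int × Int × Int) : Decidable (Spec_count_playable_cards hand pile pile_color out) := by unfold Spec_count_playable_cards; infer_instance

-- ===== CLAIM (what is proved, stated in full; the proofs are below) =====
def Claim_equal_count_playable_cards : Prop := ∀ (hand : List (List (String × String))) (pile : List (String × String)) (pile_color : String), Dom_count_playable_cards hand pile pile_color → Pre_count_playable_cards hand pile pile_color → Spec_count_playable_cards hand pile pile_color (count_playable_cards hand pile pile_color)

-- ===== LEMMAS AND PROOFS =====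

-- proof-only classifier: the category label A's branch cascade assigns to a card value
def pvCategory (v : Option String) : String :=
  if v == some "TAKI" then "TAKI"
  else if v == some "+" then "+"
  else if v == some "CHADIR" then "CHADIR"
  else if (v == some "STOP") || (v == some "+2") then "STOP"
  else if v == some "chcol" then "chcol"
  else "num"

-- A's fold from an arbitrary accumulator, characterised by filter + per-category counts.
theorem foldA_characterisation (pile : List (String × String)) (pile_color : String)
    (hand : List (List (String × String)))
    (cards : List (List (String × String))) (t pl ch sp cc rn : Int) :
    hand.foldl (fun (st : (List (List (String × String))) × Int × Int × Int × Int × Int × Int) card =>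
      let (cards, t, pl, ch, sp, cc, rn) := st
      if (pvGet card "color" == some pile_color) || (pvGet card "value" == pvGet pile "value") || (pvGet card "color" == some "ALL") then
        if pvGet card "value" == some "TAKI" then (cards ++ [card], t + 1, pl, ch, sp, cc, rn)
        else if pvGet card "value" == some "+" then (cards ++ [card], t, pl + 1, ch, sp, cc, rn)
        else if pvGet card "value" == some "CHADIR" then (cards ++ [card], t, pl, ch + 1, sp, cc, rn)
        else if (pvGet card "value" == some "STOP") || (pvGet card "value" == some "+2") then (cards ++ [card], t, pl, ch, sp + 1, cc, rn)
        else if pvGet card "value" == some "chcol" then (cards ++ [card], t, pl, ch, sp, cc + 1, rn)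
        else (cards ++ [card], t, pl, ch, sp, cc, rn + 1)
      else st) (cards, t, pl, ch, sp, cc, rn)
    =
    (let ks := (hand.filter (fun card =>
        (pvGet card "color" == some pile_color) || (pvGet card "value" == pvGet pile "value") || (pvGet card "color" == some "ALL"))).map
        (fun card => pvCategory (pvGet card "value"))
     (cards ++ hand.filter (fun card =>
        (pvGet card "color" == some pile_color) || (pvGet card "value" == pvGet pile "value") || (pvGet card "color" == some "ALL")),
      t + ks.count "TAKI", pl + ks.count "+", ch + ks.count "CHADIR",
      sp + ks.count "STOP", cc + ks.count "chcol", rn + ks.count "num")) := by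
  induction hand generalizing cards t pl ch sp cc rn with
  | nil => simp
  | cons c rest ih =>
    by_cases hp : ((pvGet c "color" == some pile_color) || (pvGet c "value" == pvGet pile "value") || (pvGet c "color" == some "ALL")) = true
    · simp only [List.foldl_cons, List.filter_cons, hp, if_pos]
      by_cases h1 : (pvGet c "value" == some "TAKI") = true
      · have hc : pvCategory (pvGet c "value") = "TAKI" := by simp [pvCategory, h1]
        rw [if_pos h1, ih]
        simp [hc, Prod.ext_iff]
        omega
      · rw [if_neg h1]
        by_cases h2 : (pvGet c "value" == some "+") = true
        · have hc : pvCategory (pvGet c "value") = "+" := by simp [pvCategory, h1, h2]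
          rw [if_pos h2, ih]
          simp [hc, Prod.ext_iff]
          omega
        · rw [if_neg h2]
          by_cases h3 : (pvGet c "value" == some "CHADIR") = true
          · have hc : pvCategory (pvGet c "value") = "CHADIR" := by simp [pvCategory, h1, h2, h3]
            rw [if_pos h3, ih]
            simp [hc, Prod.ext_iff]
            omega
          · rw [if_neg h3]
            by_cases h4 : ((pvGet c "value" == some "STOP") || (pvGet c "value" == some "+2")) = true
            · have hc : pvCategory (pvGet c "value") = "STOP" := by
                simp only [pvCategory]
                rw [if_neg h1, if_neg h2, if_neg h3, if_pos h4]
              rw [if_pos h4, ih]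
              simp [hc, Prod.ext_iff]
              omega
            · rw [if_neg h4]
              by_cases h5 : (pvGet c "value" == some "chcol") = true
              · have hc : pvCategory (pvGet c "value") = "chcol" := by
                  simp only [pvCategory]
                  rw [if_neg h1, if_neg h2, if_neg h3, if_neg h4, if_pos h5]
                rw [if_pos h5, ih]
                simp [hc, Prod.ext_iff]
                omega
              · have hc : pvCategory (pvGet c "value") = "num" := by
                  simp only [pvCategory]
                  rw [if_neg h1, if_neg h2, if_neg h3, if_neg h4, if_neg h5]
                rw [if_neg h5, ih]
                simp [hc, Prod.ext_iff]
                omega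
    · simp only [List.foldl_cons, List.filter_cons]
      rw [if_neg hp]
      simp only [Bool.not_eq_true] at hp
      simp only [hp, Bool.false_eq_true, if_false]
      exact ih cards t pl ch sp cc rn

-- category-label counts expressed through the underlying value counts and the length
theorem catCounts (vs : List (Option String)) :
    (vs.map pvCategory).count "TAKI" = vs.count (some "TAKI") ∧
    (vs.map pvCategory).count "+" = vs.count (some "+") ∧
    (vs.map pvCategory).count "CHADIR" = vs.count (some "CHADIR") ∧
    (vs.map pvCategory).count "STOP" = vs.count (some "STOP") + vs.count (some "+2") ∧
    (vs.map pvCategory).count "chcol" = vs.count (some "chcol") ∧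
    (vs.map pvCategory).count "num"
      + ((vs.map pvCategory).count "TAKI" + (vs.map pvCategory).count "+"
         + (vs.map pvCategory).count "CHADIR" + (vs.map pvCategory).count "STOP"
         + (vs.map pvCategory).count "chcol") = vs.length := by
  induction vs with
  | nil => simp
  | cons v vs ih =>
    obtain ⟨i1, i2, i3, i4, i5, i6⟩ := ih
    by_cases h1 : v = some "TAKI"
    · subst h1; simp [pvCategory]; omega
    · by_cases h2 : v = some "+"
      · subst h2; simp [pvCategory]; omega
      · by_cases h3 : v = some "CHADIR"
        · subst h3; simp [pvCategory]; omega
        · by_cases h4a : v = some "STOP"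
          · subst h4a; simp [pvCategory]; omega
          · by_cases h4b : v = some "+2"
            · subst h4b; simp [pvCategory]; omega
            · by_cases h5 : v = some "chcol"
              · subst h5; simp [pvCategory]; omega
              · have hc : pvCategory v = "num" := by
                  simp [pvCategory, h1, h2, h3, h4a, h4b, h5]
                simp [hc, h1, h2, h3, h4a, h4b, h5]
                omega

-- ===== VERDICT (by name: the statement is the Claim_ definition above) =====
theorem count_playable_cards_spec : Claim_equal_count_playable_cards := by
  intro hand pile pile_color _ _
  unfold Spec_count_playable_cards count_playable_cards count_playable_cards_alt
  rw [foldA_characterisation]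
  simp only [PySem.List.count, List.nil_append, zero_add]
  have hm : ∀ L : List (List (String × String)),
      List.map (fun card => pvCategory (pvGet card "value")) L
        = List.map pvCategory (L.map (fun c => pvGet c "value")) := by
    intro L; simp [List.map_map, Function.comp]
  obtain ⟨e1, e2, e3, e4, e5, e6⟩ := catCounts
    ((hand.filter (fun c =>
      (pvGet c "color" == some pile_color) || (pvGet c "value" == pvGet pile "value") || (pvGet c "color" == some "ALL"))).map
      (fun c => pvGet c "value"))
  simp only [Prod.ext_iff]
  refine ⟨trivial, ?_, ?_, ?_, ?_, ?_, ?_⟩ <;> rw [hm] <;> omega
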